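-- pv_equiv track=rewrite | github.com/yunqiqiliang/VectorDBBench | VectorDBBenchEnv/lib/python3.11/site-packages/clickzetta/connector/v0/query_result.py | do_split_single
-- ===== SOURCE A (Python) =====
-- delimiters = [',', ':', '=', '\t']
--
-- def do_split_single(row_str, index, column_size):
--     """
--     Split one row into multiple columns
--     """
--     if not row_str:
--         return []
--
--     result = []
--     current_item = []
--     in_quotes = False
--
--     delimiter = delimiters[index]
--
--     for char in row_str:
--         if char == '"':
--             in_quotes = not in_quotes
--
--         if char == delimiter and not in_quotes:
--             result.append(''.join(current_item))
--             current_item = []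
--         else:
--             current_item.append(char)
--
--     # Add the last item
--     if current_item:
--         result.append(''.join(current_item))
--
--     # If there are less columns than expected, fill with None
--     if column_size > 0 and len(result) < column_size:
--         result.extend([None] * (column_size - len(result)))
--
--     return result
-- ===== SOURCE B (Python) =====
-- delimiters = [',', ':', '=', '\t']
--
-- def do_split_single(row_str, index, column_size):
--     """Split one row into columns: library split on the delimiter, then merge
--     back the pieces that fall inside double quotes (running quote parity)."""
--     if not row_str:
--         return []
--     delimiter = delimiters[index]
--     fields = []
--     open_q = False
--     for part in row_str.split(delimiter):
--         if fields and open_q: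
--             fields[-1] = fields[-1] + delimiter + part
--         else:
--             fields.append(part)
--         if part.count('"') % 2 == 1:
--             open_q = not open_q
--     if fields[-1] == '':
--         fields.pop()
--     if column_size > 0 and len(fields) < column_size:
--         fields.extend([None] * (column_size - len(fields)))
--     return fields
-- ===== Notes on version B (the rewrite author's own statement) =====
-- stated objective: alternative
-- what changed: B replaces A's char-by-char accumulate-and-flush scan with a library split on the delimiter followed by a single merge pass that re-joins pieces whose running double-quote parity says they were split inside quotes.
import Mathlib
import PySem

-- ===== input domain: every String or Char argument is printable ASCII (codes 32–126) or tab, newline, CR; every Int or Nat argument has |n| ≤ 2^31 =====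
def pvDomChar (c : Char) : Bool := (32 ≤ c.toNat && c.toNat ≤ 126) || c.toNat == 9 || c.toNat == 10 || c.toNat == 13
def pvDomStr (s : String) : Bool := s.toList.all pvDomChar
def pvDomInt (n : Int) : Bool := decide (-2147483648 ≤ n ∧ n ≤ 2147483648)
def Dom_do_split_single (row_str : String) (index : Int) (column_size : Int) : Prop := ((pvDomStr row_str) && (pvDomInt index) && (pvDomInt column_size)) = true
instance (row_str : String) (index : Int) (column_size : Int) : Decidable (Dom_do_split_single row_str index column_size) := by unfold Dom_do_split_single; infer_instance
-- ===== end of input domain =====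

-- B replaces A's char-by-char accumulate-and-flush loop by a library split on the
-- delimiter followed by a merge of quote-open pieces (objective: alternative).

-- ===== PORT A =====
def pvDelimiters : List Char := [',', ':', '=', '\t']

-- one step of A's `for char in row_str` loop; state = (result, current_item, in_quotes)
def pvStepA (delim : Char) (st : List String × List Char × Bool) (c : Char) :
    List String × List Char × Bool :=
  let q := if c = '"' then !st.2.2 else st.2.2
  if c = delim ∧ q = false then (st.1 ++ [String.mk st.2.1], [], q)
  else (st.1, st.2.1 ++ [c], q)

def do_split_single (row_str : String) (index : Int) (column_size : Int) : List (Option String) :=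
  let cs := row_str.toList
  if cs = [] then []
  else
    match PySem.List.pyGet? pvDelimiters index with
    | none => []   -- Python raises IndexError here; excluded by Pre_
    | some delim =>
      let st := cs.foldl (pvStepA delim) ([], [], false)
      let result := if st.2.1 ≠ [] then st.1 ++ [String.mk st.2.1] else st.1
      if 0 < column_size ∧ (result.length : Int) < column_size then
        result.map some ++ List.replicate (column_size - (result.length : Int)).toNat none
      else
        result.map some

-- ===== PORT B =====
-- one step of B's `for part in row_str.split(delimiter)` loop; state = (fields, open_q)
def pvStepB (delim : Char) (st : List (List Char) × Bool) (p : List Char) :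
    List (List Char) × Bool :=
  let fields := if st.1 ≠ [] ∧ st.2 = true then st.1.dropLast ++ [st.1.getLastD [] ++ delim :: p]
                else st.1 ++ [p]
  let openq := if PySem.Chars.count p ['"'] % 2 = 1 then !st.2 else st.2
  (fields, openq)

def do_split_single_alt (row_str : String) (index : Int) (column_size : Int) : List (Option String) :=
  let cs := row_str.toList
  if cs = [] then []
  else
    match PySem.List.pyGet? pvDelimiters index with
    | none => []   -- Python raises IndexError here; excluded by Pre_
    | some delim =>
      let parts := PySem.Chars.splitOn cs [delim]
      let fields := (parts.foldl (pvStepB delim) ([], false)).1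
      let fields := if fields.getLastD [] = [] then fields.dropLast else fields
      if 0 < column_size ∧ (fields.length : Int) < column_size then
        fields.map (fun f => some (String.mk f)) ++ List.replicate (column_size - (fields.length : Int)).toNat none
      else
        fields.map (fun f => some (String.mk f))

-- ===== PRECONDITION & SPEC =====
-- Pre_ excludes only the inputs on which A's `delimiters[index]` raises IndexError
-- (a nonempty row with an index outside [-4, 4); on an empty row A returns [] first).
def Pre_do_split_single (row_str : String) (index : Int) (column_size : Int) : Prop :=
  row_str.toList = [] ∨ (-4 ≤ index ∧ index < 4)
instance (row_str : String) (index : Int) (column_size : Int) : Decidable (Pre_do_split_single row_str index column_size) := by unfold Pre_do_split_single; infer_instance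

def pvWitness_do_split_single : String × Int × Int := ("a,\"b,c\",", 0, 5)

def Spec_do_split_single (row_str : String) (index : Int) (column_size : Int) (out : List (Option String)) : Prop := out = do_split_single_alt row_str index column_size
instance (row_str : String) (index : Int) (column_size : Int) (out : List (Option String)) : Decidable (Spec_do_split_single row_str index column_size out) := by unfold Spec_do_split_single; infer_instance

-- ===== CLAIM (what is proved, stated in full; the proofs are below) =====
def Claim_equal_do_split_single : Prop := ∀ (row_str : String) (index : Int) (column_size : Int), Dom_do_split_single row_str index column_size → Pre_do_split_single row_str index column_size → Spec_do_split_single row_str index column_size (do_split_single row_str index column_size)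

-- ===== LEMMAS AND PROOFS =====

-- abstract one-accumulator splitter: pvSplit d acc cs = Python cs.split(d) with acc prefixed to the first piece
def pvSplit (d : Char) : List Char → List Char → List (List Char)
  | acc, [] => [acc]
  | acc, c :: cs => if c = d then acc :: pvSplit d [] cs else pvSplit d (acc ++ [c]) cs

-- the common spec: quote-aware split, cur = field collected so far, q = in_quotes
def pvSpJ (d : Char) : List Char → Bool → List Char → List (List Char)
  | cur, _, [] => [cur]
  | cur, q, c :: cs =>
    let q' := if c = '"' then !q else q
    if c = d ∧ q' = false then cur :: pvSpJ d [] q' cs else pvSpJ d (cur ++ [c]) q' cs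

-- quote parity of a piece
def pvPar (p : List Char) : Bool := p.count '"' % 2 = 1

-- B's merging loop as a recursion over the remaining parts
def pvGlue (d : Char) : List Char → Bool → List (List Char) → List (List Char)
  | cur, _, [] => [cur]
  | cur, o, p :: ps =>
    if o then pvGlue d (cur ++ d :: p) (if pvPar p then !o else o) ps
    else cur :: pvGlue d p (pvPar p) ps

lemma pv_getLastD_irrel {A : Type} (L : List A) (h : L ≠ []) (a b : A) :
    L.getLastD a = L.getLastD b := by
  cases L with
  | nil => exact absurd rfl h
  | cons x xs =>
    rw [List.getLastD_eq_getLast?, List.getLastD_eq_getLast?, List.getLast?_eq_some_getLast h]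
    rfl

lemma pvSplit_ne_nil (d : Char) (acc cs : List Char) : pvSplit d acc cs ≠ [] := by
  induction cs generalizing acc with
  | nil => simp [pvSplit]
  | cons c cs ih => simp only [pvSplit]; split <;> simp [ih]

lemma pvSpJ_ne_nil (d : Char) (cur : List Char) (q : Bool) (cs : List Char) :
    pvSpJ d cur q cs ≠ [] := by
  induction cs generalizing cur q with
  | nil => simp [pvSpJ]
  | cons c cs ih => simp only [pvSpJ]; split <;> split <;> simp [ih]

lemma pv_count_go (x : Char) (fuel : Nat) (l : List Char) (acc : Nat)
    (h : l.length ≤ fuel) : PySem.Chars.count.go [x] fuel l acc = acc + l.count x := by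
  induction fuel generalizing l acc with
  | zero =>
    cases l with
    | nil => simp [PySem.Chars.count.go]
    | cons c t => simp at h
  | succ fuel ih =>
    cases l with
    | nil => simp [PySem.Chars.count.go]
    | cons c t =>
      simp only [PySem.Chars.count.go]
      by_cases hx : x = c
      · subst hx
        simp only [List.isPrefixOf, beq_self_eq_true, Bool.and_self, if_true]
        rw [show List.drop ([x] : List Char).length (x :: t) = t by simp,
            ih t (acc + 1) (by simpa using h)]
        simp [List.count_cons]
        omega
      · have : ([x].isPrefixOf (c :: t)) = false := by
          simp [List.isPrefixOf, hx]
        rw [this]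
        simp only [Bool.false_eq_true, if_false]
        rw [ih t acc (by simpa using h)]
        simp [List.count_cons, hx, Ne.symm hx]

lemma pv_count_single (x : Char) (l : List Char) :
    PySem.Chars.count l [x] = l.count x := by
  unfold PySem.Chars.count
  rw [show ([x] : List Char).isEmpty = false from rfl]
  simp only [Bool.false_eq_true, if_false]
  rw [pv_count_go x l.length l 0 le_rfl]
  omega

lemma pv_splitOn_go (d : Char) (fuel : Nat) (l cur : List Char) (acc : List (List Char))
    (h : l.length < fuel) :
    PySem.Chars.splitOn.go [d] fuel l cur acc = acc.reverse ++ pvSplit d cur.reverse l := by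
  induction fuel generalizing l cur acc with
  | zero => omega
  | succ fuel ih =>
    cases l with
    | nil => simp [PySem.Chars.splitOn.go, pvSplit]
    | cons c t =>
      simp only [PySem.Chars.splitOn.go]
      by_cases hd : d = c
      · subst hd
        simp only [List.isPrefixOf, beq_self_eq_true, Bool.and_self, if_true]
        rw [List.length_cons] at h
        rw [show List.drop ([d] : List Char).length (d :: t) = t by simp,
            ih t [] (cur.reverse :: acc) (by omega)]
        simp [pvSplit]
      · have : ([d].isPrefixOf (c :: t)) = false := by
          simp [List.isPrefixOf, hd]
        rw [this]
        simp only [Bool.false_eq_true, if_false]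
        rw [List.length_cons] at h
        rw [ih t (c :: cur) acc (by omega)]
        simp [pvSplit, Ne.symm hd]

lemma pv_splitOn_eq (d : Char) (cs : List Char) :
    PySem.Chars.splitOn cs [d] = pvSplit d [] cs := by
  unfold PySem.Chars.splitOn
  rw [pv_splitOn_go d (cs.length + 1) cs [] [] (by omega)]
  simp

-- A's loop in terms of pvSpJ
lemma pv_foldA (d : Char) (cs : List Char) :
    ∀ (res : List String) (cur : List Char) (q : Bool),
    cs.foldl (pvStepA d) (res, cur, q) =
      (res ++ ((pvSpJ d cur q cs).dropLast).map String.mk,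
       (pvSpJ d cur q cs).getLastD [],
       cs.foldl (fun b c => if c = '"' then !b else b) q) := by
  induction cs with
  | nil => intro res cur q; simp [pvSpJ]
  | cons c cs ih =>
    intro res cur q
    simp only [List.foldl_cons, pvStepA, pvSpJ]
    set q' := if c = '"' then !q else q with hq'
    by_cases hc : c = d ∧ q' = false
    · simp only [if_pos hc]
      rw [ih (res ++ [String.mk cur]) [] q']
      have hne := pvSpJ_ne_nil d [] q' cs
      rw [List.dropLast_cons_of_ne_nil hne, List.getLastD_cons, pv_getLastD_irrel _ hne cur []]
      simp
    · simp only [if_neg hc]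
      exact ih res (cur ++ [c]) q'

-- B's loop in terms of pvGlue
lemma pv_foldB (d : Char) (ps : List (List Char)) :
    ∀ (pre : List (List Char)) (cur : List Char) (o : Bool),
    (ps.foldl (pvStepB d) (pre ++ [cur], o)).1 = pre ++ pvGlue d cur o ps := by
  induction ps with
  | nil => intro pre cur o; simp [pvGlue]
  | cons p ps ih =>
    intro pre cur o
    simp only [List.foldl_cons, pvStepB, pvGlue]
    cases o with
    | false =>
      simp only [pv_count_single, Bool.false_eq_true, and_false, if_false, Bool.not_false]
      rw [ih (pre ++ [cur]) p]
      by_cases hpp : List.count '"' p % 2 = 1 <;> simp [pvPar, hpp, List.append_assoc]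
    | true =>
      simp only [pv_count_single, List.dropLast_concat, List.getLastD_concat, Bool.not_true]
      rw [if_pos (by simp)]
      rw [ih pre (cur ++ d :: p)]
      by_cases hpp : List.count '"' p % 2 = 1 <;> simp [pvPar, hpp]

-- parity facts
lemma pv_par_nil : pvPar [] = false := by simp [pvPar]

lemma pv_par_append (u v : List Char) : pvPar (u ++ v) = xor (pvPar u) (pvPar v) := by
  simp only [pvPar, List.count_append]
  rcases Nat.mod_two_eq_zero_or_one (List.count '"' u) with h1 | h1 <;>
    rcases Nat.mod_two_eq_zero_or_one (List.count '"' v) with h2 | h2 <;>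
      simp [Nat.add_mod, h1, h2]

lemma pv_par_singleton (c : Char) (hc : c ≠ '"') : pvPar [c] = false := by
  simp [pvPar, List.count_singleton, hc]

lemma pv_par_quote : pvPar ['"'] = true := by simp [pvPar]

-- one-step unfolding of pvSpJ, let-free
lemma pvSpJ_cons (d : Char) (cur : List Char) (q : Bool) (c : Char) (cs : List Char) :
    pvSpJ d cur q (c :: cs) =
      if c = d ∧ (if c = '"' then !q else q) = false then
        cur :: pvSpJ d [] (if c = '"' then !q else q) cs
      else pvSpJ d (cur ++ [c]) (if c = '"' then !q else q) cs := rfl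

-- the bridge: split-then-merge equals the quote-aware splitter
lemma pv_bridge (d : Char) (hd : d ≠ '"') (cs : List Char) :
    ∀ (cur acc : List Char),
    (match pvSplit d acc cs with
     | [] => []
     | p :: ps => pvGlue d (cur ++ p) (pvPar (cur ++ p)) ps) =
    pvSpJ d (cur ++ acc) (pvPar (cur ++ acc)) cs := by
  induction cs with
  | nil => intro cur acc; simp [pvSplit, pvGlue, pvSpJ]
  | cons c cs ih =>
    intro cur acc
    by_cases hc : c = d
    · subst hc
      simp only [pvSplit, if_pos rfl]
      obtain ⟨p1, ps1, hsp⟩ := List.exists_cons_of_ne_nil (pvSplit_ne_nil c [] cs)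
      rw [hsp]
      simp only [pvSpJ_cons, if_neg hd]
      cases hpar : pvPar (cur ++ acc) with
      | false =>
        rw [if_pos trivial, if_pos ⟨trivial, rfl⟩]
        simp only [hpar, pvGlue, Bool.false_eq_true, if_false]
        have h0 := ih [] []
        rw [hsp] at h0
        simp only [List.nil_append, pv_par_nil] at h0
        rw [h0]
      | true =>
        rw [if_pos trivial, if_neg (by simp)]
        simp only [hpar, pvGlue, if_true]
        have h0 := ih (cur ++ acc ++ [c]) []
        rw [hsp] at h0
        simp only [List.append_nil] at h0
        have e1 : pvPar ((cur ++ acc ++ [c]) ++ p1) = (if pvPar p1 = true then !(true : Bool) else true) := by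
          rw [pv_par_append, pv_par_append, hpar, pv_par_singleton c hd]
          cases pvPar p1 <;> rfl
        have e2 : pvPar (cur ++ acc ++ [c]) = true := by
          rw [pv_par_append, hpar, pv_par_singleton c hd]
          rfl
        rw [e1, e2, show (cur ++ acc ++ [c]) ++ p1 = (cur ++ acc) ++ c :: p1 by simp] at h0
        exact h0
    · simp only [pvSplit, if_neg hc]
      have h0 := ih cur (acc ++ [c])
      rw [show cur ++ (acc ++ [c]) = (cur ++ acc) ++ [c] by simp] at h0
      rw [h0]
      simp only [pvSpJ_cons]
      rw [if_neg (fun h => hc h.1)]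
      congr 1
      by_cases hq : c = '"'
      · subst hq
        rw [if_pos rfl, pv_par_append, pv_par_quote]
        cases pvPar (cur ++ acc) <;> rfl
      · rw [if_neg hq, pv_par_append, pv_par_singleton c hq]
        cases pvPar (cur ++ acc) <;> rfl

-- the delimiter actually indexed is never the quote character
lemma pv_delim_ne (index : Int) (h : -4 ≤ index ∧ index < 4) (d : Char)
    (hdel : PySem.List.pyGet? pvDelimiters index = some d) : d ≠ '"' := by
  obtain ⟨h1, h2⟩ := h
  interval_cases index <;>
    (simp only [pvDelimiters, PySem.List.pyGet?, PySem.List.pyIdx?] at hdel; simp at hdel; subst hdel; decide)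

-- core equality: A's fields (as strings) are B's fields mapped to strings
lemma pv_core (d : Char) (hd : d ≠ '"') (cs : List Char) :
    (if (cs.foldl (pvStepA d) ([], [], false)).2.1 ≠ [] then
       (cs.foldl (pvStepA d) ([], [], false)).1 ++ [String.mk (cs.foldl (pvStepA d) ([], [], false)).2.1]
     else (cs.foldl (pvStepA d) ([], [], false)).1) =
    (if ((PySem.Chars.splitOn cs [d]).foldl (pvStepB d) ([], false)).1.getLastD [] = [] then
       ((PySem.Chars.splitOn cs [d]).foldl (pvStepB d) ([], false)).1.dropLast
     else ((PySem.Chars.splitOn cs [d]).foldl (pvStepB d) ([], false)).1).map String.mk := by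
  have hA := pv_foldA d cs [] [] false
  rw [pv_splitOn_eq]
  obtain ⟨p0, ps, hsp⟩ := List.exists_cons_of_ne_nil (pvSplit_ne_nil d [] cs)
  rw [hsp]
  have hstep0 : pvStepB d ([], false) p0 =
      ([p0], if PySem.Chars.count p0 ['"'] % 2 = 1 then !false else false) := by
    simp [pvStepB]
  have ho : (if PySem.Chars.count p0 ['"'] % 2 = 1 then !false else false) = pvPar p0 := by
    rw [pv_count_single]
    by_cases hpp : List.count '"' p0 % 2 = 1 <;> simp [pvPar, hpp]
  have hB : ((p0 :: ps).foldl (pvStepB d) ([], false)).1 = pvGlue d p0 (pvPar p0) ps := by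
    rw [List.foldl_cons, hstep0, ho,
        show ([p0] : List (List Char)) = [] ++ [p0] from rfl,
        pv_foldB d ps [] p0 (pvPar p0)]
    simp
  have hbr := pv_bridge d hd cs [] []
  rw [hsp] at hbr
  simp only [List.nil_append, pv_par_nil] at hbr
  rw [hB, hbr, hA]
  set L := pvSpJ d [] false cs with hLdef
  have hne : L ≠ [] := pvSpJ_ne_nil d [] false cs
  by_cases hlast : L.getLastD [] = []
  · rw [List.getLastD_eq_getLast?] at hlast
    simp [hlast, List.map_dropLast]
  · rw [if_pos hlast, if_neg hlast]
    have hgl : L.getLastD [] = L.getLast hne := by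
      rw [List.getLastD_eq_getLast?, List.getLast?_eq_some_getLast hne]
      rfl
    conv_rhs => rw [← List.dropLast_append_getLast hne]
    rw [List.map_append, hgl]
    simp

theorem do_split_single_spec : Claim_equal_do_split_single := by
  intro row index col hdom hpre
  unfold Spec_do_split_single do_split_single do_split_single_alt
  by_cases hcs : row.toList = []
  · simp [hcs]
  · simp only [if_neg hcs]
    rcases hdel : PySem.List.pyGet? pvDelimiters index with _ | d
    · rfl
    · have hd : d ≠ '"' := pv_delim_ne index (hpre.resolve_left hcs) d hdel
      simp only []
      rw [pv_core d hd row.toList]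
      simp [List.map_map, Function.comp_def]
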